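-- pv_equiv track=rewrite | github.com/petersmythe/geoserver | .kiro/api-analysis/fix-validation-errors.py | make_operation_id_unique
-- ===== SOURCE A (Python) =====
-- def make_operation_id_unique(base_id, path, method, used_ids):
--     """Generate a unique operation ID."""
--     # Start with base ID
--     candidate = base_id
--     counter = 1
--
--     # If already unique, return it
--     if candidate not in used_ids:
--         used_ids.add(candidate)
--         return candidate
--
--     # Try adding path segments to make it unique
--     path_parts = [p for p in path.split('/') if p and not p.startswith('{')]
--     for part in path_parts:
--         candidate = f"{base_id}_{part}"
--         if candidate not in used_ids:
--             used_ids.add(candidate)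
--             return candidate
--
--     # Fall back to counter
--     while candidate in used_ids:
--         candidate = f"{base_id}_{counter}"
--         counter += 1
--
--     used_ids.add(candidate)
--     return candidate
-- ===== SOURCE B (Python) =====
-- def make_operation_id_unique(base_id, path, method, used_ids):
--     """Generate a unique operation ID."""
--     if base_id not in used_ids:
--         used_ids.add(base_id)
--         return base_id
--
--     # Path-segment phase: collect all fresh path-based candidates, keep the first.
--     parts = [p for p in path.split('/') if p and not p.startswith('{')]
--     fresh = [base_id + '_' + p for p in parts if base_id + '_' + p not in used_ids]
--     if fresh:
--         used_ids.add(fresh[0])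
--         return fresh[0]
--
--     # Counter phase as a bounded mex: among suffixes 1..len(used_ids)+1 at least
--     # one candidate is free (pigeonhole), so the smallest free one is min of a
--     # set difference -- no unbounded trial loop.
--     full = set(range(1, len(used_ids) + 2))
--     taken = {k for k in full if base_id + '_' + str(k) in used_ids}
--     k = min(full - taken)
--     candidate = base_id + '_' + str(k)
--     used_ids.add(candidate)
--     return candidate
-- ===== Notes on version B (the rewrite author's own statement) =====
-- stated objective: alternative
-- what changed: A's unbounded while-loop that generates counter candidates one by one is replaced by a closed-form mex: build the set of taken suffixes among 1..len(used_ids)+1 and take min of a set difference (correct by pigeonhole), and the path-segment phase collects all fresh candidates and keeps the first instead of an early-return loop.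
import Mathlib
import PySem

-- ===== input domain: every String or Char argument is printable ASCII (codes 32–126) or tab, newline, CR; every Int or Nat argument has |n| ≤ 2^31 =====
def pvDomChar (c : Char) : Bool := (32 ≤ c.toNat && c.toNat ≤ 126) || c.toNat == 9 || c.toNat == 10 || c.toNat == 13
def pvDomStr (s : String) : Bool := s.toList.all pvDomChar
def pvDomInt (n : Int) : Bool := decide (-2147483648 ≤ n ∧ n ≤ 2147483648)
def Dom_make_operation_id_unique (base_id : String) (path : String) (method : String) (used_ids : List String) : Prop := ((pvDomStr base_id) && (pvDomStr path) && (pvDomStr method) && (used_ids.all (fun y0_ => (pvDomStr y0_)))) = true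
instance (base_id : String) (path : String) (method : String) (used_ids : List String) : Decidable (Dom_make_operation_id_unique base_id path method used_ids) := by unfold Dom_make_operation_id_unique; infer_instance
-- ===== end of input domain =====

-- ===== PORT A =====
-- B replaces A's unbounded counter trial loop by a bounded set-difference mex (alternative
-- decomposition); equivalence is about the RETURN value only: both Pythons also add the
-- returned id to the set used_ids (the same mutation).
-- A's 'while candidate in used_ids' loop is ported with fuel used_ids.length + 2, a totality
-- guard only: the fuel-0 branch returns the current candidate unchecked and is proved
-- unreachable (counter candidates are pairwise distinct, so one of the first
-- used_ids.length + 1 of them is free).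
def aCounterLoop (base : String) (used : List String) (candidate : String) (counter : Int) : Nat → String
  | 0 => candidate
  | f + 1 =>
      if used.contains candidate then
        aCounterLoop base used (base ++ "_" ++ PySem.Int.toStr counter) (counter + 1) f
      else candidate

-- for part in path_parts: candidate = f"{base_id}_{part}"; if candidate not in used_ids: return candidate
def aPartsLoop (base : String) (used : List String) (candidate : String) : List String → String
  | [] => aCounterLoop base used candidate 1 (used.length + 2)
  | p :: ps =>
      let c := base ++ "_" ++ p
      if !(used.contains c) then c else aPartsLoop base used c ps

def make_operation_id_unique (base_id : String) (path : String) (method : String) (used_ids : List String) : String :=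
  let candidate := base_id
  if !(used_ids.contains candidate) then candidate
  else
    let path_parts := ((PySem.Str.split? path "/").getD []).filter
      (fun p => p ≠ "" && !(PySem.Str.startswith p "{"))
    aPartsLoop base_id used_ids candidate path_parts

-- ===== PORT B =====
-- Source B: fresh = first path candidate not used (filter + head); counter phase is
-- min(set(range(1, len+2)) - taken).  Python's min raises on an empty set; that set is
-- provably nonempty (pigeonhole, proved below), so the total form .getD 1 never supplies
-- its default.
def make_operation_id_unique_alt (base_id : String) (path : String) (method : String) (used_ids : List String) : String :=
  if !(used_ids.contains base_id) then base_id
  else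
    let parts := ((PySem.Str.split? path "/").getD []).filter
      (fun p => p ≠ "" && !(PySem.Str.startswith p "{"))
    let fresh := (parts.map (fun p => base_id ++ "_" ++ p)).filter (fun c => !(used_ids.contains c))
    match fresh with
    | c :: _ => c
    | [] =>
        let full := PySem.Set.ofList (PySem.List.pyRange 1 ((used_ids.length : Int) + 2) 1)
        let taken := PySem.Set.ofList
          (full.filter (fun k => used_ids.contains (base_id ++ "_" ++ PySem.Int.toStr k)))
        let k := (PySem.List.min? (PySem.Set.diff full taken) (fun x => x)).getD 1
        base_id ++ "_" ++ PySem.Int.toStr k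

-- ===== PRECONDITION & SPEC =====
def Spec_make_operation_id_unique (base_id : String) (path : String) (method : String) (used_ids : List String) (out : String) : Prop := out = make_operation_id_unique_alt base_id path method used_ids
instance (base_id : String) (path : String) (method : String) (used_ids : List String) (out : String) : Decidable (Spec_make_operation_id_unique base_id path method used_ids out) := by unfold Spec_make_operation_id_unique; infer_instance

-- ===== CLAIM (what is proved, stated in full; the proofs are below) =====
def Claim_equal_make_operation_id_unique : Prop := ∀ (base_id : String) (path : String) (method : String) (used_ids : List String), Dom_make_operation_id_unique base_id path method used_ids → Spec_make_operation_id_unique base_id path method used_ids (make_operation_id_unique base_id path method used_ids)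

-- ===== LEMMAS AND PROOFS =====

-- § decimal representation: Nat.toDigits 10 is injective
theorem tdc_append : ∀ (f n : Nat) (l : List Char),
    Nat.toDigitsCore 10 f n l = Nat.toDigitsCore 10 f n [] ++ l := by
  intro f
  induction f with
  | zero => intro n l; simp [Nat.toDigitsCore]
  | succ f ih =>
      intro n l
      simp only [Nat.toDigitsCore]
      by_cases h : n / 10 = 0
      · simp [h]
      · simp only [h, if_false]
        rw [ih (n / 10) ((n % 10).digitChar :: l), ih (n / 10) [(n % 10).digitChar]]
        simp

theorem tdc_fuel : ∀ (f g n : Nat) (l : List Char), n < 10 ^ f → n < 10 ^ g →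
    Nat.toDigitsCore 10 (f + 1) n l = Nat.toDigitsCore 10 (g + 1) n l := by
  intro f
  induction f with
  | zero =>
      intro g n l hf hg
      have hn : n = 0 := by simpa using hf
      subst hn
      cases g with
      | zero => rfl
      | succ g => simp [Nat.toDigitsCore]
  | succ f ih =>
      intro g n l hf hg
      by_cases h : n / 10 = 0
      · simp [Nat.toDigitsCore, h]
      · have h10 : 10 ≤ n := by omega
        cases g with
        | zero => omega
        | succ g =>
            simp only [Nat.toDigitsCore, h, if_false]
            exact ih g (n / 10) _ (by omega) (by omega)

theorem toDigits_small (n : Nat) (h : n < 10) : Nat.toDigits 10 n = [Nat.digitChar n] := by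
  have h0 : n / 10 = 0 := by omega
  have h1 : n % 10 = n := by omega
  simp [Nat.toDigits, Nat.toDigitsCore, h0, h1]

theorem toDigits_step (n : Nat) (h : 10 ≤ n) :
    Nat.toDigits 10 n = Nat.toDigits 10 (n / 10) ++ [Nat.digitChar (n % 10)] := by
  have h0 : ¬ (n / 10 = 0) := by omega
  have hlt : ∀ k : Nat, k < 10 ^ k := fun k => Nat.lt_pow_self (by norm_num)
  rw [Nat.toDigits, Nat.toDigits]
  simp only [Nat.toDigitsCore, h0, if_false]
  rw [tdc_append]
  have hf := tdc_fuel (n - 1) (n / 10) (n / 10) []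
    (lt_of_le_of_lt (by omega) (hlt (n - 1))) (hlt (n / 10))
  rw [show n - 1 + 1 = n from by omega] at hf
  rw [hf]
  rfl

theorem toDigits_ne_nil (n : Nat) : Nat.toDigits 10 n ≠ [] := by
  by_cases h : n < 10
  · simp [toDigits_small n h]
  · simp [toDigits_step n (by omega)]

theorem digitChar_inj10 : ∀ a < 10, ∀ b < 10, Nat.digitChar a = Nat.digitChar b → a = b := by decide

theorem toDigits_inj : ∀ (m n : Nat), Nat.toDigits 10 m = Nat.toDigits 10 n → m = n := by
  intro m
  induction m using Nat.strong_induction_on with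
  | _ m ih =>
    intro n h
    by_cases hm : m < 10
    · by_cases hn : n < 10
      · rw [toDigits_small m hm, toDigits_small n hn] at h
        exact digitChar_inj10 m hm n hn (by simpa using h)
      · rw [toDigits_small m hm, toDigits_step n (by omega)] at h
        have := congrArg List.length h
        simp at this
        have := toDigits_ne_nil (n / 10)
        cases hnil : Nat.toDigits 10 (n / 10) with
        | nil => exact absurd hnil this
        | cons a l => rw [hnil] at h; simp at h
    · by_cases hn : n < 10
      · rw [toDigits_step m (by omega), toDigits_small n hn] at h
        have := toDigits_ne_nil (m / 10)
        cases hnil : Nat.toDigits 10 (m / 10) with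
        | nil => exact absurd hnil this
        | cons a l => rw [hnil] at h; simp at h
      · rw [toDigits_step m (by omega), toDigits_step n (by omega)] at h
        obtain ⟨h1, h2⟩ := List.append_inj' h (by simp)
        have hd : m / 10 = n / 10 := ih (m / 10) (by omega) (n / 10) h1
        have hmod : m % 10 = n % 10 :=
          digitChar_inj10 _ (by omega) _ (by omega) (by simpa using h2)
        omega

theorem toStr_pos_inj (j k : Int) (hj : 0 < j) (hk : 0 < k)
    (h : PySem.Int.toStr j = PySem.Int.toStr k) : j = k := by
  have h' : PySem.Int.toChars j = PySem.Int.toChars k := by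
    have := congrArg String.toList h
    simpa [PySem.Int.toList_toStr] using this
  simp only [PySem.Int.toChars, if_neg (by omega : ¬ j < 0), if_neg (by omega : ¬ k < 0)] at h'
  have := toDigits_inj _ _ h'
  omega

theorem sfx_inj (base : String) (j k : Int) (hj : 0 < j) (hk : 0 < k)
    (h : base ++ "_" ++ PySem.Int.toStr j = base ++ "_" ++ PySem.Int.toStr k) : j = k := by
  apply toStr_pos_inj j k hj hk
  have := congrArg String.toList h
  simp only [String.toList_append] at this
  have h2 := List.append_cancel_left this
  exact String.toList_inj.mp h2

theorem exists_mex (base : String) (used : List String) :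
    ∃ m : Int, 1 ≤ m ∧ m ≤ (used.length : Int) + 1 ∧
      used.contains (base ++ "_" ++ PySem.Int.toStr m) = false ∧
      ∀ j : Int, 1 ≤ j → j < m → used.contains (base ++ "_" ++ PySem.Int.toStr j) = true := by
  by_cases hall : ∀ k : Int, 1 ≤ k → k ≤ (used.length : Int) + 1 →
      used.contains (base ++ "_" ++ PySem.Int.toStr k) = true
  · exfalso
    set R := PySem.List.pyRange 1 ((used.length : Int) + 2) 1 with hR
    have hmemR : ∀ k : Int, k ∈ R ↔ 1 ≤ k ∧ k < (used.length : Int) + 2 := by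
      intro k; rw [hR]; exact PySem.List.mem_pyRange_one
    have hnodupC : (R.map (fun k => base ++ "_" ++ PySem.Int.toStr k)).Nodup := by
      refine List.Nodup.map_on ?_ (by rw [hR]; exact PySem.List.nodup_pyRange_one _ _)
      intro x hx y hy hxy
      exact sfx_inj base x y (by have := (hmemR x).mp hx; omega)
        (by have := (hmemR y).mp hy; omega) hxy
    have hsub : (R.map (fun k => base ++ "_" ++ PySem.Int.toStr k)) ⊆ used := by
      intro c hc
      obtain ⟨k, hk, rfl⟩ := List.mem_map.mp hc
      have hk' := (hmemR k).mp hk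
      have := hall k hk'.1 (by omega)
      simpa [List.contains_eq_mem] using this
    have hlenR : R.length = used.length + 1 := by
      rw [hR, PySem.List.length_pyRange_one]; omega
    have h1 : (R.map (fun k => base ++ "_" ++ PySem.Int.toStr k)).toFinset.card
        = used.length + 1 := by
      rw [List.toFinset_card_of_nodup hnodupC, List.length_map, hlenR]
    have h2 : (R.map (fun k => base ++ "_" ++ PySem.Int.toStr k)).toFinset ⊆ used.toFinset := by
      intro x hx
      rw [List.mem_toFinset] at hx ⊢
      exact hsub hx
    have h3 := Finset.card_le_card h2
    have h4 := used.toFinset_card_le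
    omega
  · push Not at hall
    obtain ⟨k0, hk1, hk2, hk3⟩ := hall
    have hk3' : used.contains (base ++ "_" ++ PySem.Int.toStr k0) = false := by
      simpa using hk3
    obtain ⟨m, ⟨hm1, hmP⟩, hleast⟩ := Int.exists_least_of_bdd
      (P := fun z => 1 ≤ z ∧ (z ≤ (used.length : Int) + 1 ∧
        used.contains (base ++ "_" ++ PySem.Int.toStr z) = false))
      ⟨1, fun z hz => hz.1⟩ ⟨k0, hk1, hk2, hk3'⟩
    refine ⟨m, hm1, hmP.1, hmP.2, ?_⟩
    intro j hj1 hjm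
    by_contra hc
    have hc' : used.contains (base ++ "_" ++ PySem.Int.toStr j) = false := by
      simpa using hc
    have := hleast j ⟨hj1, by omega, hc'⟩
    omega

theorem aCounter_eq (base : String) (used : List String) (m : Int)
    (hnot : used.contains (base ++ "_" ++ PySem.Int.toStr m) = false)
    (hbelow : ∀ j : Int, 1 ≤ j → j < m → used.contains (base ++ "_" ++ PySem.Int.toStr j) = true) :
    ∀ (f : Nat) (c : Int) (cand : String), 1 ≤ c → c ≤ m → (m + 1 - c).toNat ≤ f →
      used.contains cand = true →
      aCounterLoop base used cand c f = base ++ "_" ++ PySem.Int.toStr m := by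
  intro f
  induction f with
  | zero => intro c cand h1 h2 h3 _; omega
  | succ f ih =>
      intro c cand h1 h2 h3 hcand
      rw [aCounterLoop]
      simp only [hcand, if_true]
      by_cases hc : c = m
      · subst hc
        have hnot' : base ++ "_" ++ PySem.Int.toStr c ∉ used := by simpa using hnot
        cases f with
        | zero => rfl
        | succ f => rw [aCounterLoop]; simp [hnot']
      · exact ih (c + 1) _ (by omega) (by omega) (by omega)
          (hbelow c h1 (by omega))

theorem aParts_eq (base : String) (used : List String) (m : Int)
    (hm1 : 1 ≤ m) (hmL : m ≤ (used.length : Int) + 1)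
    (hnot : used.contains (base ++ "_" ++ PySem.Int.toStr m) = false)
    (hbelow : ∀ j : Int, 1 ≤ j → j < m → used.contains (base ++ "_" ++ PySem.Int.toStr j) = true) :
    ∀ (parts : List String) (cand : String), used.contains cand = true →
      aPartsLoop base used cand parts =
        (match (parts.map (fun p => base ++ "_" ++ p)).find? (fun c => !(used.contains c)) with
         | some c => c
         | none => base ++ "_" ++ PySem.Int.toStr m) := by
  intro parts
  induction parts with
  | nil =>
      intro cand hcand
      simp only [List.map_nil, List.find?_nil, aPartsLoop]
      exact aCounter_eq base used m hnot hbelow (used.length + 2) 1 cand (by omega) hm1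
        (by omega) hcand
  | cons p ps ih =>
      intro cand hcand
      by_cases hc : used.contains (base ++ "_" ++ p) = true
      · rw [aPartsLoop]
        simp only [hc, Bool.not_true, Bool.false_eq_true, if_false, List.map_cons,
          List.find?_cons]
        rw [ih (base ++ "_" ++ p) hc]
      · have hc' : base ++ "_" ++ p ∉ used := by simpa using hc
        simp [aPartsLoop, hc']

theorem foldl_add_nodup : ∀ (t acc : List Int), t.Nodup → (∀ x ∈ t, x ∉ acc) →
    t.foldl PySem.Set.add acc = acc ++ t := by
  intro t
  induction t with
  | nil => intro acc _ _; simp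
  | cons x xs ih =>
      intro acc hnd hdis
      have hx : x ∉ acc := hdis x (by simp)
      rw [List.foldl_cons]
      have : PySem.Set.add acc x = acc ++ [x] := by simp [PySem.Set.add, hx]
      rw [this, ih (acc ++ [x]) (List.Nodup.of_cons hnd)]
      · simp
      · intro y hy
        simp only [List.mem_append, List.mem_singleton]
        rintro (h | rfl)
        · exact hdis y (by simp [hy]) h
        · exact (List.nodup_cons.mp hnd).1 hy

theorem ofList_nodup_eq (l : List Int) (h : l.Nodup) : PySem.Set.ofList l = l := by
  rw [PySem.Set.ofList_eq_foldl]
  simpa using foldl_add_nodup l [] h (by simp)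

theorem min?_head (l : List Int) (h : l.Pairwise (· < ·)) :
    PySem.List.min? l (fun x => x) = l.head? := by
  cases l with
  | nil => rfl
  | cons x t =>
      rw [PySem.List.min?_id_cons]
      have hlt : ∀ y ∈ t, x < y := (List.pairwise_cons.mp h).1
      have hmem := PySem.List.foldl_min_mem t x
      have hle := (PySem.List.foldl_min_le t x).1
      rcases hmem with h' | h'
      · simp [h']
      · have := hlt _ h'
        omega

theorem find?_range_eq (p : Int → Bool) (m b : Int) (hp : p m = true) :
    ∀ (n : Nat) (a : Int), a ≤ m → m < b → (b - a).toNat ≤ n →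
    (∀ j : Int, a ≤ j → j < m → p j = false) →
    (PySem.List.pyRange a b 1).find? p = some m := by
  intro n
  induction n with
  | zero => intro a h1 h2 h3 _; omega
  | succ n ih =>
      intro a h1 h2 h3 hbelow
      rw [PySem.List.pyRange_one_cons (by omega)]
      by_cases ha : a = m
      · subst ha; simp [hp]
      · rw [List.find?_cons, hbelow a (by omega) (by omega)]
        exact ih (a + 1) (by omega) h2 (by omega) (fun j hj1 hj2 => hbelow j (by omega) hj2)

theorem b_counter_eq (base : String) (used : List String) (m : Int)
    (hm1 : 1 ≤ m) (hmL : m ≤ (used.length : Int) + 1)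
    (hnot : used.contains (base ++ "_" ++ PySem.Int.toStr m) = false)
    (hbelow : ∀ j : Int, 1 ≤ j → j < m → used.contains (base ++ "_" ++ PySem.Int.toStr j) = true) :
    (PySem.List.min?
      (PySem.Set.diff (PySem.Set.ofList (PySem.List.pyRange 1 ((used.length : Int) + 2) 1))
        (PySem.Set.ofList ((PySem.Set.ofList (PySem.List.pyRange 1 ((used.length : Int) + 2) 1)).filter
          (fun k => used.contains (base ++ "_" ++ PySem.Int.toStr k)))))
      (fun x => x)).getD 1 = m := by
  set R := PySem.List.pyRange 1 ((used.length : Int) + 2) 1 with hR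
  have hnod : R.Nodup := PySem.List.nodup_pyRange_one _ _
  have hfull : PySem.Set.ofList R = R := ofList_nodup_eq R hnod
  rw [hfull]
  have htaken : PySem.Set.ofList (R.filter (fun k => used.contains (base ++ "_" ++ PySem.Int.toStr k)))
      = R.filter (fun k => used.contains (base ++ "_" ++ PySem.Int.toStr k)) :=
    ofList_nodup_eq _ (hnod.filter _)
  rw [htaken]
  have hdiff : PySem.Set.diff R (R.filter (fun k => used.contains (base ++ "_" ++ PySem.Int.toStr k)))
      = R.filter (fun k => !(used.contains (base ++ "_" ++ PySem.Int.toStr k))) := by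
    show R.filter _ = _
    refine List.filter_congr ?_
    intro x hx
    simp [List.contains_eq_mem, List.mem_filter, hx]
  rw [hdiff]
  have hpair : (R.filter (fun k => !(used.contains (base ++ "_" ++ PySem.Int.toStr k)))).Pairwise (· < ·) :=
    (PySem.List.pairwise_lt_pyRange_one _ _).filter _
  rw [min?_head _ hpair, List.head?_filter]
  rw [find?_range_eq (fun k => !(used.contains (base ++ "_" ++ PySem.Int.toStr k))) m
    ((used.length : Int) + 2) (by simpa using hnot) (used.length + 2) 1 hm1 (by omega) (by omega)
    (fun j h1 h2 => by simpa using hbelow j h1 h2)]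
  rfl

-- ===== VERDICT (by name: the statement is the Claim_ definition above) =====
theorem make_operation_id_unique_spec : Claim_equal_make_operation_id_unique := by
  intro base_id path method used_ids _hDom
  unfold Spec_make_operation_id_unique
  unfold make_operation_id_unique make_operation_id_unique_alt
  by_cases hb : used_ids.contains base_id = true
  · simp only [hb, Bool.not_true, Bool.false_eq_true, if_false]
    obtain ⟨m, hm1, hmL, hnot, hbelow⟩ := exists_mex base_id used_ids
    rw [aParts_eq base_id used_ids m hm1 hmL hnot hbelow _ base_id hb]
    set parts := ((PySem.Str.split? path "/").getD []).filter
      (fun p => p ≠ "" && !(PySem.Str.startswith p "{")) with hparts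
    have hhf : ((parts.map (fun p => base_id ++ "_" ++ p)).filter
        (fun c => !(used_ids.contains c))).head?
        = (parts.map (fun p => base_id ++ "_" ++ p)).find? (fun c => !(used_ids.contains c)) :=
      List.head?_filter
    cases hfind : (parts.map (fun p => base_id ++ "_" ++ p)).find? (fun c => !(used_ids.contains c)) with
    | some c =>
        rw [hfind] at hhf
        cases hfr : (parts.map (fun p => base_id ++ "_" ++ p)).filter
            (fun c => !(used_ids.contains c)) with
        | nil => rw [hfr] at hhf; simp at hhf
        | cons a t =>
            rw [hfr] at hhf
            simp only [List.head?_cons, Option.some.injEq] at hhf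
            simp [hhf]
    | none =>
        rw [hfind] at hhf
        cases hfr : (parts.map (fun p => base_id ++ "_" ++ p)).filter
            (fun c => !(used_ids.contains c)) with
        | cons a t => rw [hfr] at hhf; simp at hhf
        | nil =>
            rw [b_counter_eq base_id used_ids m hm1 hmL hnot hbelow]
  · have hb' : base_id ∉ used_ids := by simpa using hb
    simp [hb']
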